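-- pv_equiv track=rewrite | github.com/AdityaJain921/Flappy-bird | LogicsFile.py | get_current_state
-- ===== SOURCE A (Python) =====
-- def get_current_state(mat):
--     for i in range(4):
--         for j in range(4):
--             if mat[i][j] == 2048:
--                 return "WON"
--
--     #Anywhere 0 is present
--     for i in range(4):
--         for j in range(4):
--             if mat[i][j] == 0:
--                 return "GAME NOT OVER"
--
--     #Every row and coloumn except last row and coloumn
--     for i in range(3):
--         for j in range(3):
--             if (mat[i][j] == mat[i][j+1] or mat[i][j] == mat[i+1][j]):
--                 return "GAME NOT OVER"
--     #last row
--     for j in range(3):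
--         if mat[3][j] == mat[3][j+1]:
--             return "GAME NOT OVER"
--      #Last coloumn
--     for i in range(3):
--         if mat[i][3] == mat[i+1][3]:
--             return "GAME NOT OVER"
--     return "GAME OVER"
-- ===== SOURCE B (Python) =====
-- def get_current_state(mat):
--     # One pass: flatten to 16 cells, accumulate three flags, decide once at the end.
--     flat = [mat[k // 4][k % 4] for k in range(16)]
--     won = zero = merge = False
--     for k in range(16):
--         v = flat[k]
--         won = won or v == 2048
--         zero = zero or v == 0
--         merge = merge or (k % 4 < 3 and v == flat[k + 1]) or (k < 12 and v == flat[k + 4])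
--     if won:
--         return "WON"
--     if zero or merge:
--         return "GAME NOT OVER"
--     return "GAME OVER"
-- ===== Notes on version B (the rewrite author's own statement) =====
-- stated objective: alternative
-- what changed: B flattens the board to a 16-cell list and makes a SINGLE pass accumulating three boolean flags (won/zero/mergeable) with flat-index arithmetic for right/down neighbours, deciding once at the end, instead of A's five staged early-return nested loops.
-- outside the precondition, e.g. on get_current_state([[2048]]): A returns 'WON', B raises IndexError; on get_current_state([[1, 2, 3, 4], [2048, 0, 0, 0]]): A returns 'WON', B raises IndexError
import Mathlib
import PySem

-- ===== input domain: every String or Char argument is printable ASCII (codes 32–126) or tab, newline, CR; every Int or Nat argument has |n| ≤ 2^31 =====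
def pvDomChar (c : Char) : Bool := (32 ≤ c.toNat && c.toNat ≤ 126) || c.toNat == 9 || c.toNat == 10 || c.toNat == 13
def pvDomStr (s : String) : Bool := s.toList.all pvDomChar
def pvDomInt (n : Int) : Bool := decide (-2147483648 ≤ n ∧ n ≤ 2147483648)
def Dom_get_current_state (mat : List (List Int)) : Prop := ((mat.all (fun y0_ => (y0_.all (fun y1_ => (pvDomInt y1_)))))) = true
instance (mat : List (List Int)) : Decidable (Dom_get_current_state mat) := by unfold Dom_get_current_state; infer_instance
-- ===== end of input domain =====

-- B makes one flat 16-cell pass accumulating won/zero/merge flags instead of A's five staged early-return loops; objective: alternative.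

-- ===== PORT A =====
-- mat[i][j]; Pre_ guarantees i,j in range, so the default is never used inside Pre_.
def pvCell (mat : List (List Int)) (i j : Int) : Int :=
  PySem.List.pyGetD (PySem.List.pyGetD mat i []) j 0

-- literal transliteration of A: five early-return loop nests, encoded as findSome? chains
def get_current_state (mat : List (List Int)) : String :=
  (Option.orElse
    ((PySem.List.pyRange 0 4 1).findSome? (fun i =>
      (PySem.List.pyRange 0 4 1).findSome? (fun j =>
        if pvCell mat i j = 2048 then some "WON" else none)))
    (fun _ => Option.orElse
      ((PySem.List.pyRange 0 4 1).findSome? (fun i =>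
        (PySem.List.pyRange 0 4 1).findSome? (fun j =>
          if pvCell mat i j = 0 then some "GAME NOT OVER" else none)))
      (fun _ => Option.orElse
        ((PySem.List.pyRange 0 3 1).findSome? (fun i =>
          (PySem.List.pyRange 0 3 1).findSome? (fun j =>
            if pvCell mat i j = pvCell mat i (j+1) ∨ pvCell mat i j = pvCell mat (i+1) j
            then some "GAME NOT OVER" else none)))
        (fun _ => Option.orElse
          ((PySem.List.pyRange 0 3 1).findSome? (fun j =>
            if pvCell mat 3 j = pvCell mat 3 (j+1) then some "GAME NOT OVER" else none))
          (fun _ =>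
            (PySem.List.pyRange 0 3 1).findSome? (fun i =>
              if pvCell mat i 3 = pvCell mat (i+1) 3 then some "GAME NOT OVER" else none)))))).getD
    "GAME OVER"

-- ===== PORT B =====
-- transliteration of Source B: flatten to 16 cells, one fold accumulating (won, zero, merge), decide at the end.
-- flat[k+1]/flat[k+4] are guarded by k%4<3 / k<12 exactly as in Source B (Python's `and` short-circuits there).
def get_current_state_alt (mat : List (List Int)) : String :=
  let flat := (PySem.List.pyRange 0 16 1).map (fun k =>
    pvCell mat (PySem.Int.floordiv k 4) (PySem.Int.mod k 4))
  let st := (PySem.List.pyRange 0 16 1).foldl (fun (s : Bool × Bool × Bool) k =>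
      let v := PySem.List.pyGetD flat k 0
      (s.1 || decide (v = 2048),
       s.2.1 || decide (v = 0),
       s.2.2 || (decide (PySem.Int.mod k 4 < 3) && decide (v = PySem.List.pyGetD flat (k+1) 0))
            || (decide (k < 12) && decide (v = PySem.List.pyGetD flat (k+4) 0))))
    (false, false, false)
  if st.1 then "WON"
  else if st.2.1 || st.2.2 then "GAME NOT OVER"
  else "GAME OVER"

-- ===== PRECONDITION & SPEC =====
-- Pre_ restricts to well-formed 4x4 boards, the game's natural domain: on smaller boards A raises
-- IndexError unless its 2048-scan returns before reaching a missing index; B flattens the full grid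
-- first and so raises IndexError on every smaller board.
def Pre_get_current_state (mat : List (List Int)) : Prop :=
  4 ≤ mat.length ∧ ∀ r ∈ mat.take 4, 4 ≤ r.length
instance (mat : List (List Int)) : Decidable (Pre_get_current_state mat) := by
  unfold Pre_get_current_state; infer_instance

def pvWitness_get_current_state : List (List Int) :=
  [[2, 4, 8, 16], [32, 64, 128, 256], [512, 1024, 2, 4], [8, 16, 32, 64]]

def Spec_get_current_state (mat : List (List Int)) (out : String) : Prop := out = get_current_state_alt mat
instance (mat : List (List Int)) (out : String) : Decidable (Spec_get_current_state mat out) := by unfold Spec_get_current_state; infer_instance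

-- ===== CLAIM (what is proved, stated in full; the proofs are below) =====
def Claim_equal_get_current_state : Prop := ∀ (mat : List (List Int)), Dom_get_current_state mat → Pre_get_current_state mat → Spec_get_current_state mat (get_current_state mat)

-- ===== LEMMAS AND PROOFS =====

-- a findSome? whose body returns the same constant on success is an any-test
theorem pvFindSome?_ite_const {α : Type} (l : List α) (p : α → Prop) [DecidablePred p] (c : String) :
    l.findSome? (fun x => if p x then some c else none)
      = (if l.any (fun x => decide (p x)) then some c else none) := by
  induction l with
  | nil => simp
  | cons a t ih =>
    by_cases h : p a <;> simp [List.findSome?, h, ih]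

theorem pvOrElse_ite (b : Prop) [Decidable b] (c : String) (o : Option String) :
    Option.orElse (if b then some c else none) (fun _ => o) = if b then some c else o := by
  split_ifs <;> rfl

theorem pvGetD_ite (b : Prop) [Decidable b] (c e : String) (o : Option String) :
    (if b then some c else o).getD e = if b then c else o.getD e := by
  split_ifs <;> rfl

theorem pvRange4 : PySem.List.pyRange 0 4 1 = [0, 1, 2, 3] := by decide
theorem pvRange3 : PySem.List.pyRange 0 3 1 = [0, 1, 2] := by decide
theorem pvRange16 : PySem.List.pyRange 0 16 1 = [0,1,2,3,4,5,6,7,8,9,10,11,12,13,14,15] := by decide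

theorem pvIfOrCollapseP (a b : Prop) [Decidable a] [Decidable b] (x y : String) :
    (if a then x else if b then x else y) = (if a ∨ b then x else y) := by
  split_ifs <;> tauto

set_option maxHeartbeats 1600000 in
theorem get_current_state_eq_alt (mat : List (List Int)) :
    get_current_state mat = get_current_state_alt mat := by
  unfold get_current_state get_current_state_alt
  simp only [pvFindSome?_ite_const, pvOrElse_ite, pvGetD_ite, Option.getD_none]
  norm_num only [pvRange4, pvRange3, pvRange16, List.any_cons, List.any_nil, Bool.decide_coe,
    List.map_cons, List.map_nil, List.foldl_cons, List.foldl_nil,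
    show (Int.fdiv 0 4 : Int) = 0 from by decide,
    show (Int.fmod 0 4 : Int) = 0 from by decide,
    show (Int.fdiv 1 4 : Int) = 0 from by decide,
    show (Int.fmod 1 4 : Int) = 1 from by decide,
    show (Int.fdiv 2 4 : Int) = 0 from by decide,
    show (Int.fmod 2 4 : Int) = 2 from by decide,
    show (Int.fdiv 3 4 : Int) = 0 from by decide,
    show (Int.fmod 3 4 : Int) = 3 from by decide,
    show (Int.fdiv 4 4 : Int) = 1 from by decide,
    show (Int.fmod 4 4 : Int) = 0 from by decide,
    show (Int.fdiv 5 4 : Int) = 1 from by decide,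
    show (Int.fmod 5 4 : Int) = 1 from by decide,
    show (Int.fdiv 6 4 : Int) = 1 from by decide,
    show (Int.fmod 6 4 : Int) = 2 from by decide,
    show (Int.fdiv 7 4 : Int) = 1 from by decide,
    show (Int.fmod 7 4 : Int) = 3 from by decide,
    show (Int.fdiv 8 4 : Int) = 2 from by decide,
    show (Int.fmod 8 4 : Int) = 0 from by decide,
    show (Int.fdiv 9 4 : Int) = 2 from by decide,
    show (Int.fmod 9 4 : Int) = 1 from by decide,
    show (Int.fdiv 10 4 : Int) = 2 from by decide,
    show (Int.fmod 10 4 : Int) = 2 from by decide,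
    show (Int.fdiv 11 4 : Int) = 2 from by decide,
    show (Int.fmod 11 4 : Int) = 3 from by decide,
    show (Int.fdiv 12 4 : Int) = 3 from by decide,
    show (Int.fmod 12 4 : Int) = 0 from by decide,
    show (Int.fdiv 13 4 : Int) = 3 from by decide,
    show (Int.fmod 13 4 : Int) = 1 from by decide,
    show (Int.fdiv 14 4 : Int) = 3 from by decide,
    show (Int.fmod 14 4 : Int) = 2 from by decide,
    show (Int.fdiv 15 4 : Int) = 3 from by decide,
    show (Int.fmod 15 4 : Int) = 3 from by decide,
    show (decide ((0:Int) < 3)) = true from by decide,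
    show (decide ((1:Int) < 3)) = true from by decide,
    show (decide ((2:Int) < 3)) = true from by decide,
    show (decide ((3:Int) < 3)) = false from by decide,
    show (decide ((0:Int) < 12)) = true from by decide,
    show (decide ((1:Int) < 12)) = true from by decide,
    show (decide ((2:Int) < 12)) = true from by decide,
    show (decide ((3:Int) < 12)) = true from by decide,
    show (decide ((4:Int) < 12)) = true from by decide,
    show (decide ((5:Int) < 12)) = true from by decide,
    show (decide ((6:Int) < 12)) = true from by decide,
    show (decide ((7:Int) < 12)) = true from by decide,
    show (decide ((8:Int) < 12)) = true from by decide,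
    show (decide ((9:Int) < 12)) = true from by decide,
    show (decide ((10:Int) < 12)) = true from by decide,
    show (decide ((11:Int) < 12)) = true from by decide,
    show (decide ((12:Int) < 12)) = false from by decide,
    show (decide ((13:Int) < 12)) = false from by decide,
    show (decide ((14:Int) < 12)) = false from by decide,
    show (decide ((15:Int) < 12)) = false from by decide,
    PySem.Int.floordiv, PySem.Int.mod,
    PySem.List.pyGetD_ofNat', List.getD_eq_getElem?_getD, List.getElem?_cons_zero,
    List.getElem?_cons_succ, Option.getD_some, Bool.decide_or, Bool.or_false, Bool.false_or,
    Bool.and_true, Bool.true_and, Bool.and_false, Bool.false_and]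
  rw [pvIfOrCollapseP, pvIfOrCollapseP, pvIfOrCollapseP]
  refine if_congr ?_ rfl (if_congr ?_ rfl rfl)
  · apply iff_of_eq
    congr 1
    ac_rfl
  · simp only [← Bool.or_eq_true]
    apply iff_of_eq
    congr 1
    ac_rfl

-- ===== VERDICT (by name: the statement is the Claim_ definition above) =====
theorem get_current_state_spec : Claim_equal_get_current_state := by
  intro mat _ _
  exact get_current_state_eq_alt mat
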